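-- pv_equiv track=rewrite | github.com/scbirlab/eluent | eluent/utils/datasets_io.py | _get_ref_chunk
-- ===== SOURCE A (Python) =====
-- from typing import TYPE_CHECKING, Any, Iterable, Mapping, Optional, Union
--
-- def _get_ref_chunk(
--     s,
--     sep: Optional[str] = None,
--     all_seps: str = "@~:"
-- ) -> str:
--     if sep is not None:
--         if sep in s:
--             s = s.rpartition(sep)[-1]
--         else:
--             return None
--     for _sep in all_seps:
--         s = s.partition(_sep)[0]
--     return s
-- ===== SOURCE B (Python) =====
-- def _get_ref_chunk(
--     s,
--     sep=None,
--     all_seps: str = "@~:",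
-- ):
--     if sep is not None:
--         if sep in s:
--             s = s.rpartition(sep)[-1]
--         else:
--             return None
--     cuts = [i for i in (s.find(c) for c in all_seps) if i != -1]
--     if cuts:
--         s = s[:min(cuts)]
--     return s
-- ===== Notes on version B (the rewrite author's own statement) =====
-- stated objective: simpler
-- what changed: The sequential truncation loop (repartitioning the shrinking string once per separator char) is replaced by one min over the first-occurrence index of each separator in the original string, followed by a single slice.
import Mathlib
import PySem

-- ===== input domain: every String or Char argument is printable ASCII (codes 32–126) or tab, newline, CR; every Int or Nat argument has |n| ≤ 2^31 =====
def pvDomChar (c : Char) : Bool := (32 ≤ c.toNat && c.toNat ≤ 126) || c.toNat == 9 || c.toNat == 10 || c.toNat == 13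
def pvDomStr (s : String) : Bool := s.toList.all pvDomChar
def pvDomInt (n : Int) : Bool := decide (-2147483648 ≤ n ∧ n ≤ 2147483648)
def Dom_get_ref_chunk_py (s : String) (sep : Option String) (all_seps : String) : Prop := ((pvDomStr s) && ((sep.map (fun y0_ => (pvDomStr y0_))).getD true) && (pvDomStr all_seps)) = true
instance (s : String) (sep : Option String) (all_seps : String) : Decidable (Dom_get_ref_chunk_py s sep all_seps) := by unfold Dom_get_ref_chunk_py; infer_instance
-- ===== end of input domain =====

-- B replaces A's sequential per-separator re-partition loop by one min over the
-- first-occurrence indices of the separator chars followed by a single slice (objective: simpler).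

-- ===== PORT A =====
-- s.partition(c)[0]: the part before the first occurrence of c (all of s if absent)
def truncA (t : List Char) (c : Char) : List Char :=
  let i := PySem.Chars.find t [c]
  if i = -1 then t else t.take i.toNat

def get_ref_chunk_py (s : String) (sep : Option String) (all_seps : String) : Option String :=
  let cs := s.toList
  match sep with
  | some sp =>
      if PySem.Chars.isIn sp.toList cs then
        -- s.rpartition(sep)[-1]: everything after the LAST occurrence of sep
        some (String.ofList (all_seps.toList.foldl truncA
          (cs.drop ((PySem.Chars.rfind cs sp.toList).toNat + sp.toList.length))))
      else none
  | none => some (String.ofList (all_seps.toList.foldl truncA cs))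

-- ===== PORT B =====
-- cuts = [i for i in (s.find(c) for c in all_seps) if i != -1]; if cuts: s = s[:min(cuts)]
def altCut (t : List Char) (all_seps : String) : List Char :=
  let cuts := (all_seps.toList.map (fun c => PySem.Chars.find t [c])).filter (fun i => decide (i ≠ -1))
  match PySem.List.min? cuts (fun x => x) with
  | some m => PySem.Chars.slice t none (some m)
  | none => t

def get_ref_chunk_py_alt (s : String) (sep : Option String) (all_seps : String) : Option String :=
  match sep with
  | some sp =>
      if PySem.Str.isIn sp s then
        some (String.ofList (altCut
          ((s.toList).drop ((PySem.Chars.rfind s.toList sp.toList).toNat + sp.toList.length)) all_seps))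
      else none
  | none => some (String.ofList (altCut s.toList all_seps))

-- ===== PRECONDITION & SPEC =====
-- Pre_ excludes only an empty separator argument, on which Python A (and B) raises ValueError in rpartition.
def Pre_get_ref_chunk_py (s : String) (sep : Option String) (all_seps : String) : Prop :=
  sep ≠ some ""
instance (s : String) (sep : Option String) (all_seps : String) : Decidable (Pre_get_ref_chunk_py s sep all_seps) := by unfold Pre_get_ref_chunk_py; infer_instance

def pvWitness_get_ref_chunk_py : String × Option String × String := ("CHEMBL25@ref~x", some "@", "@~:")

def Spec_get_ref_chunk_py (s : String) (sep : Option String) (all_seps : String) (out : Option String) : Prop := out = get_ref_chunk_py_alt s sep all_seps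
instance (s : String) (sep : Option String) (all_seps : String) (out : Option String) : Decidable (Spec_get_ref_chunk_py s sep all_seps out) := by unfold Spec_get_ref_chunk_py; infer_instance

-- ===== CLAIM (what is proved, stated in full; the proofs are below) =====
def Claim_equal_get_ref_chunk_py : Prop := ∀ (s : String) (sep : Option String) (all_seps : String), Dom_get_ref_chunk_py s sep all_seps → Pre_get_ref_chunk_py s sep all_seps → Spec_get_ref_chunk_py s sep all_seps (get_ref_chunk_py s sep all_seps)

-- ===== LEMMAS AND PROOFS =====

-- first index of c in t, minimality side
theorem idxOf_min (t : List Char) (c : Char) : ∀ i, i < t.idxOf c → t[i]? ≠ some c := by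
  induction t with
  | nil => intro i h; simp at h
  | cons a t ih =>
    intro i h
    by_cases hac : a = c
    · simp [hac, List.idxOf_cons_self] at h
    · cases i with
      | zero => simpa using hac
      | succ j =>
        have : j < t.idxOf c := by
          rw [List.idxOf_cons_ne _ (by simpa using hac)] at h; omega
        simpa using ih j this

theorem getElem?_idxOf {t : List Char} {c : Char} (h : c ∈ t) : t[t.idxOf c]? = some c := by
  rw [List.getElem?_eq_getElem (List.idxOf_lt_length_of_mem h)]
  simp [List.getElem_idxOf]

theorem singleton_prefix_iff (c : Char) (u : List Char) : [c] <+: u ↔ u[0]? = some c := by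
  cases u with
  | nil => simp
  | cons a u => simp [List.cons_prefix_iff]

-- PySem.Chars.find on a single char is List.idxOf
theorem find_singleton (t : List Char) (c : Char) :
    PySem.Chars.find t [c] = if c ∈ t then ((t.idxOf c : Nat) : Int) else -1 := by
  by_cases h : c ∈ t
  · have hinf : [c] <:+: t := by
      obtain ⟨u, v, rfl⟩ := List.append_of_mem h
      exact ⟨u, v, by simp⟩
    have hnn : 0 ≤ PySem.Chars.find t [c] := (PySem.Chars.find_nonneg_iff _ _).mpr hinf
    obtain ⟨hpre, hmin⟩ := PySem.Chars.find_spec hnn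
    set j := (PySem.Chars.find t [c]).toNat with hj
    have hjc : t[j]? = some c := by
      have := (singleton_prefix_iff c (t.drop j)).mp hpre
      simpa using this
    have h1 : t.idxOf c ≤ j := by
      by_contra hlt
      exact idxOf_min t c j (by omega) hjc
    have h2 : j ≤ t.idxOf c := by
      by_contra hlt
      have : ¬ [c] <+: t.drop (t.idxOf c) := hmin _ (by omega)
      exact this ((singleton_prefix_iff c _).mpr (by simpa using getElem?_idxOf h))
    have : j = t.idxOf c := by omega
    simp [h, ← this, hj, Int.toNat_of_nonneg hnn]
  · have : ¬ [c] <:+: t := by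
      intro hinf
      exact h (hinf.subset (by simp))
    simp [h, (PySem.Chars.find_eq_neg_one_iff _ _).mpr this]

theorem truncA_eq (t : List Char) (c : Char) : truncA t c = t.take (t.idxOf c) := by
  unfold truncA
  rw [find_singleton]
  by_cases h : c ∈ t
  · simp [h]
  · simp [h]

theorem idxOf_take (t : List Char) (c : Char) : ∀ k, (t.take k).idxOf c = min (t.idxOf c) (min k t.length) := by
  induction t with
  | nil => intro k; simp
  | cons a t ih =>
    intro k
    cases k with
    | zero => simp
    | succ k =>
      by_cases hac : a = c
      · simp [hac, List.idxOf_cons_self]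
      · rw [List.take_succ_cons, List.idxOf_cons_ne _ (by simpa using hac),
            List.idxOf_cons_ne _ (by simpa using hac), ih k]
        simp only [List.length_cons]
        omega

theorem foldl_min_capped (xs : List Nat) : ∀ (a i : Nat), a ≤ i →
    (xs.map (fun x => min x i)).foldl min a = xs.foldl min a := by
  induction xs with
  | nil => intro a i _; simp
  | cons x xs ih =>
    intro a i h
    simp only [List.map_cons, List.foldl_cons]
    rw [show min a (min x i) = min a x by omega]
    exact ih _ i (by omega)

theorem foldl_min_le (xs : List Nat) : ∀ a : Nat, xs.foldl min a ≤ a := by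
  induction xs with
  | nil => intro a; simp
  | cons x xs ih => intro a; exact le_trans (ih (min a x)) (by omega)

-- A's loop cuts at the overall minimal first-occurrence index
theorem foldA_eq (seps : List Char) : ∀ t : List Char,
    seps.foldl truncA t = t.take ((seps.map (fun c => t.idxOf c)).foldl min t.length) := by
  induction seps with
  | nil => intro t; simp
  | cons c cs ih =>
    intro t
    have hle : t.idxOf c ≤ t.length := List.idxOf_le_length
    rw [List.foldl_cons, truncA_eq, ih]
    rw [List.take_take]
    have hlen : (t.take (t.idxOf c)).length = t.idxOf c := by
      simp; omega
    have hmap : cs.map (fun c' => (t.take (t.idxOf c)).idxOf c')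
        = (cs.map (fun c' => t.idxOf c')).map (fun x => min x (t.idxOf c)) := by
      rw [List.map_map]
      apply List.map_congr_left; intro c' _
      simp only [Function.comp]
      rw [idxOf_take]; omega
    rw [hmap, hlen, foldl_min_capped _ _ _ (le_refl _)]
    have h1 : (cs.map (fun c' => t.idxOf c')).foldl min (t.idxOf c) ≤ t.idxOf c :=
      foldl_min_le _ _
    rw [show min ((cs.map (fun c' => t.idxOf c')).foldl min (t.idxOf c)) (t.idxOf c)
        = (cs.map (fun c' => t.idxOf c')).foldl min (t.idxOf c) by omega]
    simp only [List.map_cons, List.foldl_cons]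
    rw [show min t.length (t.idxOf c) = t.idxOf c by omega]

-- B's cuts list is the idxOf's of the present separator chars, as Ints
theorem cuts_eq (t : List Char) (seps : List Char) :
    (seps.map (fun c => PySem.Chars.find t [c])).filter (fun i => decide (i ≠ -1))
      = (seps.filter (fun c => decide (c ∈ t))).map (fun c => ((t.idxOf c : Nat) : Int)) := by
  induction seps with
  | nil => simp
  | cons c cs ih =>
    simp only [List.map_cons, List.filter_cons]
    rw [find_singleton]
    by_cases h : c ∈ t
    · have hne : ((t.idxOf c : Nat) : Int) ≠ -1 := by omega
      simp [h, hne]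
      simpa using ih
    · simp [h]
      simpa using ih

theorem foldl_min_intCast (f : Char → Nat) (cs : List Char) : ∀ a : Nat,
    (cs.map (fun c => ((f c : Nat) : Int))).foldl min ((a : Nat) : Int) = (((cs.map f).foldl min a : Nat) : Int) := by
  induction cs with
  | nil => intro a; simp
  | cons x xs ih =>
    intro a
    simp only [List.map_cons, List.foldl_cons]
    rw [← Nat.cast_min]
    exact ih _

theorem foldl_min_absorb_absent (t : List Char) (seps : List Char) : ∀ a : Nat, a ≤ t.length →
    (seps.map (fun c => t.idxOf c)).foldl min a
      = ((seps.filter (fun c => decide (c ∈ t))).map (fun c => t.idxOf c)).foldl min a := by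
  induction seps with
  | nil => intro a _; simp
  | cons c cs ih =>
    intro a ha
    simp only [List.map_cons, List.foldl_cons, List.filter_cons]
    by_cases h : c ∈ t
    · simp only [h, decide_true, if_true, List.map_cons, List.foldl_cons]
      exact ih _ (by omega)
    · rw [List.idxOf_eq_length_iff.mpr h]
      simp only [h, decide_false]
      rw [show min a t.length = a by omega]
      exact ih a ha

-- main: A's fold equals B's cut-at-min
theorem main_eq (t : List Char) (all_seps : String) :
    all_seps.toList.foldl truncA t = altCut t all_seps := by
  unfold altCut
  rw [cuts_eq, foldA_eq]
  rcases hfil : all_seps.toList.filter (fun c => decide (c ∈ t)) with _ | ⟨c, cs⟩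
  · -- no separator occurs in t
    rw [foldl_min_absorb_absent t _ t.length (le_refl _), hfil]
    simp [PySem.List.min?]
  · -- some separator occurs: min? gives the minimum
    have hc : c ∈ t := by
      have : c ∈ all_seps.toList.filter (fun c => decide (c ∈ t)) := by rw [hfil]; simp
      simpa using (List.of_mem_filter this)
    simp only [List.map_cons, PySem.List.min?_id_cons]
    rw [foldl_min_intCast (fun c => t.idxOf c) cs (t.idxOf c)]
    have h0 : (0:Int) ≤ (((cs.map (fun c => t.idxOf c)).foldl min (t.idxOf c) : Nat) : Int) := by positivity
    rw [PySem.Chars.slice_eq_listSlice, PySem.List.slice_to _ h0]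
    rw [Int.toNat_natCast]
    rw [foldl_min_absorb_absent t _ t.length (le_refl _), hfil]
    simp only [List.map_cons, List.foldl_cons]
    rw [show min t.length (t.idxOf c) = t.idxOf c by
      have := List.idxOf_le_length (a := c) (l := t); omega]

-- ===== VERDICT (by name: the statement is the Claim_ definition above) =====
theorem get_ref_chunk_py_spec : Claim_equal_get_ref_chunk_py := by
  intro s sep all_seps _ _
  unfold Spec_get_ref_chunk_py get_ref_chunk_py get_ref_chunk_py_alt
  cases sep with
  | none => simp [main_eq]
  | some sp =>
    simp only [PySem.Str.isIn_eq]
    by_cases h : PySem.Chars.isIn sp.toList s.toList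
    · simp [h, main_eq]
    · simp [h]
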